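-- pv_equiv track=rewrite | github.com/teobouvard/study | 4-UiS/algorithm-theory/assignment2/algo.py | largest_set
-- ===== SOURCE A (Python) =====
-- def largest_set(x):
--     maxlen = 0
--     maxseq = 0
--     for i in range(len(x) - 1):
--         j = i + 1
--         n = 2
--         while x[j] - x[i] <= 1:
--             j += 1
--             n += 1
--         if n - 1 > maxlen:
--             maxlen = n - 1
--             maxseq = i
--     return maxseq, maxlen
-- ===== SOURCE B (Python) =====
-- def largest_set(x):
--     n = len(x)
--     # f[i] = first index j > i with x[j] - x[i] > 1, computed right-to-left with
--     # memoized jumps: whenever x[j] <= x[i], every element before f[j] is within 1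
--     # of x[j] and hence of x[i], so skip straight to f[j] instead of re-scanning.
--     f = [0] * (n - 1)
--     for i in range(n - 2, -1, -1):
--         j = i + 1
--         while x[j] - x[i] <= 1:
--             j = f[j] if x[j] <= x[i] else j + 1
--         f[i] = j
--     maxlen = 0
--     maxseq = 0
--     for i in range(n - 1):
--         if f[i] - i > maxlen:
--             maxlen = f[i] - i
--             maxseq = i
--     return maxseq, maxlen
-- ===== Notes on version B (the rewrite author's own statement) =====
-- stated objective: alternative
-- what changed: B replaces A's per-start rescan of each window by a right-to-left pass that memoizes, for every position j, the first index whose value exceeds x[j] by more than 1, and follows these memoized jumps instead of re-scanning; a second pass then picks the first longest window.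
import Mathlib
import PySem

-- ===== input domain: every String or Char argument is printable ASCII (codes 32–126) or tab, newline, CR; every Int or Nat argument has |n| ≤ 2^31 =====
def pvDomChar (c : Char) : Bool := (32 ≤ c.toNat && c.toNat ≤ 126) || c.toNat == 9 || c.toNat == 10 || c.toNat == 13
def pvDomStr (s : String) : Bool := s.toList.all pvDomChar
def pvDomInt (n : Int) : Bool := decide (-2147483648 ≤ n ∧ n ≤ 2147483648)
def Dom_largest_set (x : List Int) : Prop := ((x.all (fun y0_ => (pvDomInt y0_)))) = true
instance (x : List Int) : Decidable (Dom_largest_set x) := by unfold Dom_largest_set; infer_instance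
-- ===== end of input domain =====

-- B replaces A's per-start rescan of each window by a right-to-left pass that memoizes,
-- for every position, the first index whose value exceeds it by more than 1, and follows
-- these memoized jumps instead of re-scanning (objective: alternative).
-- ===== PORT A =====
-- inner 'while x[j] - x[i] <= 1: j += 1; n += 1'; fuel-bounded; Python raises
-- IndexError exactly where pyGet? is none (outside Pre_), the port exits there.
def aScan (x : List Int) (xi : Int) : Int → Int → Nat → Int × Int
  | j, nc, 0 => (j, nc)
  | j, nc, fuel + 1 =>
    match PySem.List.pyGet? x j with
    | none => (j, nc)
    | some v => if v - xi ≤ 1 then aScan x xi (j + 1) (nc + 1) fuel else (j, nc)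

def largest_set (x : List Int) : Int × Int :=
  let st := (List.range (x.length - 1)).foldl (fun (st : Int × Int) (i : Nat) =>
    match PySem.List.pyGet? x (i : Int) with
    | none => st   -- unreachable: i < len(x)
    | some xi =>
      let p := aScan x xi ((i : Int) + 1) 2 x.length
      if p.2 - 1 > st.1 then (p.2 - 1, (i : Int)) else st) (0, 0)
  (st.2, st.1)

-- ===== PORT B =====
-- the 'while x[j] - x[i] <= 1: j = f[j] if x[j] <= x[i] else j + 1' loop; fuel-bounded;
-- Python raises IndexError exactly where a pyGet? is none (outside Pre_), the port exits there.
def bJump (x f : List Int) (xi : Int) : Int → Nat → Int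
  | j, 0 => j
  | j, fuel + 1 =>
    match PySem.List.pyGet? x j with
    | none => j
    | some v =>
      if v - xi ≤ 1 then
        if v ≤ xi then
          match PySem.List.pyGet? f j with
          | none => j
          | some t => bJump x f xi t fuel
        else bJump x f xi (j + 1) fuel
      else j

-- 'f = [0] * (n - 1); for i in range(n - 2, -1, -1): … f[i] = j'
def bBuild (x : List Int) : List Int :=
  ((List.range (x.length - 1)).reverse).foldl (fun (f : List Int) (i : Nat) =>
    match PySem.List.pyGet? x (i : Int) with
    | none => f   -- unreachable: i < len(x)
    | some xi => f.set i (bJump x f xi ((i : Int) + 1) (x.length + 1)))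
    (List.replicate (x.length - 1) 0)

def largest_set_alt (x : List Int) : Int × Int :=
  let f := bBuild x
  let st := (List.range (x.length - 1)).foldl (fun (st : Int × Int) (i : Nat) =>
    if f.getD i 0 - (i : Int) > st.1 then (f.getD i 0 - (i : Int), (i : Int)) else st) (0, 0)
  (st.2, st.1)

-- ===== PRECONDITION & SPEC =====
-- Pre_: exactly the inputs on which Python A (and Python B) returns — every start i must
-- see some later value exceeding x[i] by more than 1, else the unguarded while of either
-- program runs past the end of the list and raises IndexError.
def Pre_largest_set (x : List Int) : Prop :=
  ∀ i < x.length - 1, ∃ j < x.length, i < j ∧ x.getD j 0 - x.getD i 0 > 1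
instance (x : List Int) : Decidable (Pre_largest_set x) := by unfold Pre_largest_set; infer_instance
def pvWitness_largest_set : List Int := [0, 2, 4, 6, 8]

def Spec_largest_set (x : List Int) (out : Int × Int) : Prop := out = largest_set_alt x
instance (x : List Int) (out : Int × Int) : Decidable (Spec_largest_set x out) := by unfold Spec_largest_set; infer_instance

-- ===== CLAIM (what is proved, stated in full; the proofs are below) =====
def Claim_equal_largest_set : Prop := ∀ (x : List Int), Dom_largest_set x → Pre_largest_set x → Spec_largest_set x (largest_set x)

-- ===== LEMMAS AND PROOFS =====

-- specification of both inner loops: first index j' ≥ j with x[j'] - xi > 1, or len(x)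
def FB (x : List Int) (xi : Int) (j : Nat) : Nat :=
  if h : j < x.length then
    if x.getD j 0 - xi > 1 then j else FB x xi (j + 1)
  else j
termination_by x.length - j

lemma FB_ge (x : List Int) (xi : Int) (j : Nat) : j ≤ FB x xi j := by
  rw [FB]
  split_ifs with h1 h2
  · exact le_refl j
  · have := FB_ge x xi (j + 1); omega
  · exact le_refl j
termination_by x.length - j

lemma FB_le (x : List Int) (xi : Int) (j : Nat) (h : j ≤ x.length) : FB x xi j ≤ x.length := by
  rw [FB]
  split_ifs with h1 h2
  · omega
  · exact FB_le x xi (j + 1) h1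
  · omega
termination_by x.length - j

lemma FB_of_ge (x : List Int) (xi : Int) (j : Nat) (h : x.length ≤ j) : FB x xi j = j := by
  rw [FB, dif_neg (by omega : ¬ j < x.length)]

lemma FB_of_bad (x : List Int) (xi : Int) (j : Nat) (h : j < x.length)
    (hb : x.getD j 0 - xi > 1) : FB x xi j = j := by
  rw [FB, dif_pos h, if_pos hb]

lemma FB_of_good (x : List Int) (xi : Int) (j : Nat) (h : j < x.length)
    (hg : x.getD j 0 - xi ≤ 1) : FB x xi j = FB x xi (j + 1) := by
  rw [FB, dif_pos h, if_neg (by omega : ¬ x.getD j 0 - xi > 1)]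

lemma FB_good (x : List Int) (xi : Int) (j k : Nat) (h1 : j ≤ k) (h2 : k < FB x xi j) :
    x.getD k 0 - xi ≤ 1 := by
  by_cases h : j < x.length
  · by_cases hb : x.getD j 0 - xi > 1
    · rw [FB_of_bad x xi j h hb] at h2; omega
    · rcases Nat.eq_or_lt_of_le h1 with rfl | hlt
      · omega
      · exact FB_good x xi (j + 1) k hlt (by rwa [FB_of_good x xi j h (by omega)] at h2)
  · rw [FB_of_ge x xi j (by omega)] at h2; omega
termination_by x.length - j

lemma FB_skip (x : List Int) (xi : Int) (j j' : Nat) (h1 : j ≤ j') (h2 : j' ≤ x.length)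
    (hg : ∀ k, j ≤ k → k < j' → x.getD k 0 - xi ≤ 1) : FB x xi j = FB x xi j' := by
  rcases Nat.eq_or_lt_of_le h1 with rfl | hlt
  · rfl
  · have hj : j < x.length := by omega
    rw [FB_of_good x xi j hj (hg j le_rfl hlt)]
    exact FB_skip x xi (j + 1) j' hlt h2 (fun k hk1 hk2 => hg k (by omega) hk2)
termination_by j' - j

lemma FB_le_of_bad (x : List Int) (xi : Int) (j k : Nat) (hjk : j ≤ k) (hk : k < x.length)
    (hb : x.getD k 0 - xi > 1) : FB x xi j ≤ k := by
  rcases Nat.eq_or_lt_of_le hjk with rfl | hlt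
  · rw [FB_of_bad x xi j hk hb]
  · by_cases hg : x.getD j 0 - xi ≤ 1
    · rw [FB_of_good x xi j (by omega) hg]
      exact FB_le_of_bad x xi (j + 1) k hlt hk hb
    · rw [FB_of_bad x xi j (by omega) (by omega)]; omega
termination_by k - j

lemma aScan_eq (x : List Int) (xi : Int) :
    ∀ (fuel j : Nat) (c : Int), j ≤ x.length → x.length - j ≤ fuel →
      aScan x xi (j : Int) c fuel =
        ((FB x xi j : Int), c + ((FB x xi j : Int) - (j : Int)))
  | 0, j, c, hj, hf => by
    have hjl : j = x.length := by omega
    rw [FB_of_ge x xi j (by omega)]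
    simp [aScan]
  | fuel + 1, j, c, hj, hf => by
    by_cases h : j < x.length
    · have hsome : PySem.List.pyGet? x (j : Int) = some (x.getD j 0) := by
        rw [PySem.List.pyGet?_natCast, List.getElem?_eq_getElem h, List.getD_eq_getElem x 0 h]
      rw [aScan, hsome]
      by_cases hg : x.getD j 0 - xi ≤ 1
      · have hc : ((j : Int) + 1) = ((j + 1 : Nat) : Int) := by push_cast; ring
        simp only [hg, if_pos]
        rw [hc, aScan_eq x xi fuel (j + 1) (c + 1) (by omega) (by omega),
          FB_of_good x xi j h hg]
        have harith : c + 1 + (((FB x xi (j + 1) : Nat) : Int) - ((j + 1 : Nat) : Int))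
            = c + (((FB x xi (j + 1) : Nat) : Int) - (j : Int)) := by push_cast; ring
        rw [harith]
      · simp only [hg, if_false]
        rw [FB_of_bad x xi j h (by omega)]
        simp
    · have hnone : PySem.List.pyGet? x (j : Int) = none := by
        rw [PySem.List.pyGet?_natCast, List.getElem?_eq_none (by omega)]
      rw [aScan, hnone, FB_of_ge x xi j (by omega)]
      simp

lemma bJump_eq (x f : List Int) (xi : Int) (hfl : f.length = x.length - 1) :
    ∀ (fuel j : Nat), j ≤ x.length → x.length - j ≤ fuel →
      (∀ k : Nat, j ≤ k → k < x.length - 1 →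
        f.getD k 0 = ((FB x (x.getD k 0) (k + 1) : Nat) : Int)) →
      FB x xi j < x.length →
      bJump x f xi (j : Int) fuel = ((FB x xi j : Nat) : Int)
  | 0, j, hj, hf, hm, hFB => by
    have := FB_ge x xi j; omega
  | fuel + 1, j, hj, hf, hm, hFB => by
    have h : j < x.length := by have := FB_ge x xi j; omega
    have hsome : PySem.List.pyGet? x (j : Int) = some (x.getD j 0) := by
      rw [PySem.List.pyGet?_natCast, List.getElem?_eq_getElem h, List.getD_eq_getElem x 0 h]
    rw [bJump, hsome]
    by_cases hg : x.getD j 0 - xi ≤ 1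
    · have hjlt : j < x.length - 1 := by
        have h1 : FB x xi j = FB x xi (j + 1) := FB_of_good x xi j h hg
        have h2 := FB_ge x xi (j + 1)
        omega
      simp only [hg, if_pos]
      by_cases hle : x.getD j 0 ≤ xi
      · simp only [hle, if_pos]
        have hfsome : PySem.List.pyGet? f (j : Int) = some (f.getD j 0) := by
          rw [PySem.List.pyGet?_natCast, List.getElem?_eq_getElem (by omega : j < f.length),
            List.getD_eq_getElem f 0 (by omega : j < f.length)]
        rw [hfsome, hm j le_rfl hjlt]
        set F := FB x (x.getD j 0) (j + 1) with hF
        have hFge : j + 1 ≤ F := FB_ge x (x.getD j 0) (j + 1)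
        have hFle : F ≤ x.length := FB_le x (x.getD j 0) (j + 1) (by omega)
        have hskip : FB x xi j = FB x xi F := by
          apply FB_skip x xi j F (by omega) hFle
          intro k hk1 hk2
          rcases Nat.eq_or_lt_of_le hk1 with rfl | hlt
          · exact hg
          · have := FB_good x (x.getD j 0) (j + 1) k (by omega) (by omega)
            omega
        rw [hskip]
        exact bJump_eq x f xi hfl fuel F hFle (by omega)
          (fun k hk1 hk2 => hm k (by omega) hk2) (by omega)
      · simp only [hle, if_false]
        have hc : ((j : Int) + 1) = ((j + 1 : Nat) : Int) := by push_cast; ring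
        have hgood : FB x xi j = FB x xi (j + 1) := FB_of_good x xi j h hg
        rw [hc, bJump_eq x f xi hfl fuel (j + 1) (by omega) (by omega)
          (fun k hk1 hk2 => hm k (by omega) hk2) (by omega), hgood]
    · simp only [hg, if_false]
      rw [FB_of_bad x xi j h (by omega)]

lemma bBuild_inv (x : List Int)
    (hpre : ∀ k : Nat, k < x.length - 1 → FB x (x.getD k 0) (k + 1) < x.length) :
    ∀ (i : Nat) (f : List Int), i ≤ x.length - 1 → f.length = x.length - 1 →
      (∀ k : Nat, i ≤ k → k < x.length - 1 →
        f.getD k 0 = ((FB x (x.getD k 0) (k + 1) : Nat) : Int)) →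
      ∀ k : Nat, k < x.length - 1 →
        (((List.range i).reverse).foldl (fun (f : List Int) (i : Nat) =>
          match PySem.List.pyGet? x (i : Int) with
          | none => f
          | some xi => f.set i (bJump x f xi ((i : Int) + 1) (x.length + 1))) f).getD k 0
          = ((FB x (x.getD k 0) (k + 1) : Nat) : Int)
  | 0, f, hi, hl, hm, k, hk => by
    simpa using hm k (by omega) hk
  | i + 1, f, hi, hl, hm, k, hk => by
    have hrange : (List.range (i + 1)).reverse = i :: (List.range i).reverse := by
      rw [List.range_succ, List.reverse_append]; rfl
    have hilt : i < x.length := by omega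
    have hsome : PySem.List.pyGet? x (i : Int) = some (x.getD i 0) := by
      rw [PySem.List.pyGet?_natCast, List.getElem?_eq_getElem hilt, List.getD_eq_getElem x 0 hilt]
    rw [hrange, List.foldl_cons, hsome]
    have hc : ((i : Int) + 1) = ((i + 1 : Nat) : Int) := by push_cast; ring
    have hjump : bJump x f (x.getD i 0) ((i : Int) + 1) (x.length + 1)
        = ((FB x (x.getD i 0) (i + 1) : Nat) : Int) := by
      rw [hc]
      exact bJump_eq x f (x.getD i 0) hl (x.length + 1) (i + 1) (by omega) (by omega)
        (fun k hk1 hk2 => hm k (by omega) hk2) (hpre i (by omega))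
    refine bBuild_inv x hpre i (f.set i (bJump x f (x.getD i 0) ((i : Int) + 1) (x.length + 1)))
      (by omega) (by simpa using hl) ?_ k hk
    intro k hk1 hk2
    rcases Nat.eq_or_lt_of_le hk1 with rfl | hlt
    · rw [List.getD_eq_getElem?_getD, List.getElem?_set_self (by omega), hjump]
      rfl
    · rw [List.getD_eq_getElem?_getD, List.getElem?_set_ne (by omega),
        ← List.getD_eq_getElem?_getD]
      exact hm k (by omega) hk2

lemma bBuild_spec (x : List Int)
    (hpre : ∀ k : Nat, k < x.length - 1 → FB x (x.getD k 0) (k + 1) < x.length)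
    (k : Nat) (hk : k < x.length - 1) :
    (bBuild x).getD k 0 = ((FB x (x.getD k 0) (k + 1) : Nat) : Int) := by
  unfold bBuild
  exact bBuild_inv x hpre (x.length - 1) (List.replicate (x.length - 1) 0) le_rfl (by simp)
    (fun k hk1 hk2 => by omega) k hk

lemma folds_eq (x : List Int)
    (hpre : ∀ k : Nat, k < x.length - 1 → FB x (x.getD k 0) (k + 1) < x.length) :
    (List.range (x.length - 1)).foldl (fun (st : Int × Int) (i : Nat) =>
      match PySem.List.pyGet? x (i : Int) with
      | none => st
      | some xi =>
        let p := aScan x xi ((i : Int) + 1) 2 x.length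
        if p.2 - 1 > st.1 then (p.2 - 1, (i : Int)) else st) (0, 0)
    = (List.range (x.length - 1)).foldl (fun (st : Int × Int) (i : Nat) =>
      if (bBuild x).getD i 0 - (i : Int) > st.1 then ((bBuild x).getD i 0 - (i : Int), (i : Int)) else st) (0, 0) := by
  apply PySem.List.foldl_congr_mem
  intro st i hi
  have hilt : i < x.length - 1 := by
    have := List.mem_range.mp hi; omega
  have hsome : PySem.List.pyGet? x (i : Int) = some (x.getD i 0) := by
    rw [PySem.List.pyGet?_natCast, List.getElem?_eq_getElem (by omega : i < x.length),
      List.getD_eq_getElem x 0 (by omega : i < x.length)]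
  have hc : ((i : Int) + 1) = ((i + 1 : Nat) : Int) := by push_cast; ring
  have hscan := aScan_eq x (x.getD i 0) x.length (i + 1) 2 (by omega) (by omega)
  have hb := bBuild_spec x hpre i hilt
  simp only [hsome, hc, hscan, hb]
  have hFge : i + 1 ≤ FB x (x.getD i 0) (i + 1) := FB_ge x (x.getD i 0) (i + 1)
  have harith : (2 + (((FB x (x.getD i 0) (i + 1) : Nat) : Int) - ((i + 1 : Nat) : Int))) - 1
      = ((FB x (x.getD i 0) (i + 1) : Nat) : Int) - (i : Int) := by push_cast; ring
  simp only [harith]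

-- ===== VERDICT (by name: the statement is the Claim_ definition above) =====
theorem largest_set_spec : Claim_equal_largest_set := by
  intro x _dom hpre
  have hpre' : ∀ k : Nat, k < x.length - 1 → FB x (x.getD k 0) (k + 1) < x.length := by
    intro k hk
    obtain ⟨j, hj, hkj, hb⟩ := hpre k hk
    have := FB_le_of_bad x (x.getD k 0) (k + 1) j (by omega) hj hb
    omega
  unfold Spec_largest_set largest_set largest_set_alt
  rw [folds_eq x hpre']
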